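-- pv_equiv track=rewrite | github.com/GEC-git/AptaMat | aptalign/AptAlign.py | subdiv_finder
-- ===== SOURCE A (Python) =====
-- def subdiv_finder(sequence,subdiv_param):
--     """
--     Finds and marks with "O" and "C" the pairings that compose opening and closing overdivisions.
--     """
--     par="()"
--     dict_par={}
--     dict_seq={}
--     for i,elt in enumerate(sequence):
--         if elt in par:
--             dict_par[i]=elt
--         dict_seq[i]=elt
--
--     new_dict={}
--     subdiv={}
--     while dict_par != {}:
--         index_list=list(dict_par.keys())
--         i=0
--         while dict_par[index_list[i]]==dict_par[index_list[i+1]]: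
--             i+=1
--         if not((index_list[i+1] - index_list[i]) > int(len(sequence)/subdiv_param)):
--             new_dict[index_list[i]]=dict_par[index_list[i]]
--             new_dict[index_list[i+1]]=dict_par[index_list[i+1]]
--         else:
--             subdiv[index_list[i]]=dict_par[index_list[i]]
--             subdiv[index_list[i+1]]=dict_par[index_list[i+1]]
--
--         del(dict_par[index_list[i]])
--         del(dict_par[index_list[i+1]])
--
--     for elt in subdiv.keys():
--         if dict_seq[elt]=="(":
--             dict_seq[elt]="O"
--         elif dict_seq[elt]==")":
--             dict_seq[elt]="C"
--
--     new_seq=''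
--     for elt in dict_seq.values():
--         new_seq+=elt
--
--     subdiv_list=[]
--     subdiv_dict={}
--     new_subdiv=True
--     for i,elt in enumerate(new_seq):
--         if elt=="O":
--             if new_subdiv:
--                 new_subdiv=False
--             subdiv_dict[i]="("
--
--         elif elt =="C":
--             if new_subdiv:
--                 new_subdiv=False
--             subdiv_dict[i]=")"
--
--         else:
--             new_subdiv=True
--             if subdiv_dict!={}:
--                 subdiv_list.append(subdiv_dict)
--             subdiv_dict={}
--
--     if subdiv_dict!={}:
--         subdiv_list.append(subdiv_dict)
--
--     return subdiv_list, new_seq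
-- ===== SOURCE B (Python) =====
-- def subdiv_finder(sequence, subdiv_param):
--     """
--     Finds and marks with "O" and "C" the pairings that compose opening and closing overdivisions.
--     One-pass stack matching of bracket pairs instead of repeated dict rescans.
--     """
--     n = len(sequence)
--     stack = []          # unmatched brackets (index, char); all chars on the stack are equal
--     over = set()        # indices belonging to overlong pairs
--     for i, ch in enumerate(sequence):
--         if ch == "(" or ch == ")":
--             if stack and stack[-1][1] != ch:
--                 j, _ = stack.pop()
--                 if i - j > int(n / subdiv_param):
--                     over.add(j)
--                     over.add(i)
--             else:
--                 stack.append((i, ch))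
--     chars = []
--     for i, ch in enumerate(sequence):
--         if i in over:
--             chars.append("O" if ch == "(" else "C")
--         else:
--             chars.append(ch)
--     new_seq = "".join(chars)
--     groups = []
--     cur = {}
--     for i, ch in enumerate(new_seq):
--         if ch == "O":
--             cur[i] = "("
--         elif ch == "C":
--             cur[i] = ")"
--         else:
--             if cur:
--                 groups.append(cur)
--             cur = {}
--     if cur:
--         groups.append(cur)
--     return groups, new_seq
-- ===== Notes on version B (the rewrite author's own statement) =====
-- stated objective: faster
-- what changed: Replaces the quadratic loop that rebuilds the bracket dict's key list and rescans it to delete one adjacent pair per round with a single stack-based matching pass that records each pair when its closer arrives.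
import Mathlib
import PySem

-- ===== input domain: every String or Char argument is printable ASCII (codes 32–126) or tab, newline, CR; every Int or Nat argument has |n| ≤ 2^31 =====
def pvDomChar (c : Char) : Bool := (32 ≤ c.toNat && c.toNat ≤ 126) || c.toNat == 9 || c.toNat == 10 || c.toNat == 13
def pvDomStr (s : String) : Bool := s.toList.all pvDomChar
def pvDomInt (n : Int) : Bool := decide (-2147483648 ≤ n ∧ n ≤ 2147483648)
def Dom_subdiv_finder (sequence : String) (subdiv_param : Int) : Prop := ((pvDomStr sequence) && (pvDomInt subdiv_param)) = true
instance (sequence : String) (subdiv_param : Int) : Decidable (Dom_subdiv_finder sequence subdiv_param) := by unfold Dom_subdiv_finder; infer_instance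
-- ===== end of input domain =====

-- B replaces A's repeated rebuild-and-rescan of the bracket dict (one adjacent pair deleted per round)
-- by a single stack-based matching pass; equal return value on Pre_ (balanced brackets, no zero division).

-- ===== PORT A =====

def pvBracket (c : Char) : Bool := c == '(' || c == ')'

-- 'for i,elt in enumerate(sequence): if elt in par: dict_par[i]=elt; dict_seq[i]=elt'
def pvDictsStep (d : PySem.Dict Int Char × PySem.Dict Int Char) (q : Int × Char) :
    PySem.Dict Int Char × PySem.Dict Int Char :=
  (if pvBracket q.2 then (d.1).insert q.1 q.2 else d.1, (d.2).insert q.1 q.2)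

-- inner 'while dict_par[index_list[i]]==dict_par[index_list[i+1]]: i+=1' over the key list:
-- scanning i over the keys with dict lookups IS scanning the items list; none = Python's IndexError (outside Pre_)
def pvScanA : List (Int × Char) → Option ((Int × Char) × (Int × Char))
  | a :: b :: rest => if a.2 == b.2 then pvScanA (b :: rest) else some (a, b)
  | _ => none

-- the outer 'while dict_par != {}' loop; fuel = initial number of keys (two keys are deleted per round)
def pvLoopA (n p : Int) : Nat → PySem.Dict Int Char → PySem.Dict Int Char → PySem.Dict Int Char →
    PySem.Dict Int Char × PySem.Dict Int Char
  | 0, _, nd, sd => (nd, sd)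
  | fuel+1, dp, nd, sd =>
    match pvScanA dp.items with
    | none => (nd, sd)   -- dict empty: normal exit; nonempty: Python raises IndexError (outside Pre_)
    | some (a, b) =>
      if ¬(b.1 - a.1 > PySem.Int.truncdiv n p) then
        pvLoopA n p fuel ((dp.erase a.1).erase b.1) (PySem.Dict.insert (PySem.Dict.insert nd a.1 a.2) b.1 b.2) sd
      else
        pvLoopA n p fuel ((dp.erase a.1).erase b.1) nd (PySem.Dict.insert (PySem.Dict.insert sd a.1 a.2) b.1 b.2)

-- 'if dict_seq[elt]=="(": ... elif dict_seq[elt]==")": ...' (missing key = Python KeyError, unreachable)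
def pvRewriteStep (ds : PySem.Dict Int Char) (k : Int) : PySem.Dict Int Char :=
  match PySem.Dict.get? ds k with
  | some c => if c == '(' then ds.insert k 'O' else if c == ')' then ds.insert k 'C' else ds
  | none => ds

def pvGroupStepA (st : List (PySem.Dict Int String) × PySem.Dict Int String × Bool) (q : Int × Char) :
    List (PySem.Dict Int String) × PySem.Dict Int String × Bool :=
  if q.2 == 'O' then (st.1, (st.2.1).insert q.1 "(", if st.2.2 then false else st.2.2)
  else if q.2 == 'C' then (st.1, (st.2.1).insert q.1 ")", if st.2.2 then false else st.2.2)
  else (if st.2.1.items ≠ [] then st.1 ++ [st.2.1] else st.1, PySem.Dict.empty, true)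

def subdiv_finder (sequence : String) (subdiv_param : Int) : (List (List (Int × String))) × String :=
  let cs := sequence.toList
  let dicts := (PySem.List.enumerate cs).foldl pvDictsStep (PySem.Dict.empty, PySem.Dict.empty)
  let dict_par := dicts.1
  let dict_seq := dicts.2
  let res := pvLoopA (PySem.Str.len sequence) subdiv_param dict_par.items.length dict_par
      PySem.Dict.empty PySem.Dict.empty
  let subdiv := res.2
  let ds := (PySem.Dict.keys subdiv).foldl pvRewriteStep dict_seq
  let newChars := PySem.Dict.values ds
  let fin := (PySem.List.enumerate newChars).foldl pvGroupStepA ([], PySem.Dict.empty, true)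
  let subdiv_list := if fin.2.1.items ≠ [] then fin.1 ++ [fin.2.1] else fin.1
  (subdiv_list.map PySem.Dict.items, String.ofList newChars)

-- ===== PORT B =====

-- one pass: a stack of still-unmatched brackets; a popped pair's span classifies it as overdivision
def pvStepB (n p : Int) (st : List (Int × Char) × PySem.Set Int) (q : Int × Char) :
    List (Int × Char) × PySem.Set Int :=
  if q.2 == '(' || q.2 == ')' then
    match st.1 with
    | t :: rest =>
      if t.2 != q.2 then
        (rest, if q.1 - t.1 > PySem.Int.truncdiv n p then PySem.Set.add (PySem.Set.add st.2 t.1) q.1 else st.2)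
      else (q :: st.1, st.2)
    | [] => ([q], st.2)
  else st

def pvGroupStepB (st : List (PySem.Dict Int String) × PySem.Dict Int String) (q : Int × Char) :
    List (PySem.Dict Int String) × PySem.Dict Int String :=
  if q.2 == 'O' then (st.1, (st.2).insert q.1 "(")
  else if q.2 == 'C' then (st.1, (st.2).insert q.1 ")")
  else (if st.2.items ≠ [] then st.1 ++ [st.2] else st.1, PySem.Dict.empty)

def subdiv_finder_alt (sequence : String) (subdiv_param : Int) : (List (List (Int × String))) × String :=
  let cs := sequence.toList
  let n := PySem.Str.len sequence
  let ovr := ((PySem.List.enumerate cs).foldl (pvStepB n subdiv_param) ([], PySem.Set.empty)).2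
  let newChars := (PySem.List.enumerate cs).map
    (fun q => if PySem.Set.contains ovr q.1 then (if q.2 == '(' then 'O' else 'C') else q.2)
  let fin := (PySem.List.enumerate newChars).foldl pvGroupStepB ([], PySem.Dict.empty)
  let groups := if fin.2.items ≠ [] then fin.1 ++ [fin.2] else fin.1
  (groups.map PySem.Dict.items, String.ofList newChars)

-- ===== PRECONDITION & SPEC =====
-- Pre_ excludes exactly the inputs where Python A raises: unbalanced bracket counts (IndexError in the
-- pair-scanning loop) and subdiv_param = 0 with a bracket present (ZeroDivisionError).
def Pre_subdiv_finder (sequence : String) (subdiv_param : Int) : Prop :=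
  sequence.toList.count '(' = sequence.toList.count ')' ∧
  (subdiv_param ≠ 0 ∨ ∀ c ∈ sequence.toList, pvBracket c = false)
instance (sequence : String) (subdiv_param : Int) : Decidable (Pre_subdiv_finder sequence subdiv_param) := by
  unfold Pre_subdiv_finder; infer_instance

def pvWitness_subdiv_finder : String × Int := ("((..).)", 3)

def Spec_subdiv_finder (sequence : String) (subdiv_param : Int) (out : (List (List (Int × String))) × String) : Prop := out = subdiv_finder_alt sequence subdiv_param
instance (sequence : String) (subdiv_param : Int) (out : (List (List (Int × String))) × String) : Decidable (Spec_subdiv_finder sequence subdiv_param out) := by unfold Spec_subdiv_finder; infer_instance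

-- ===== CLAIM (what is proved, stated in full; the proofs are below) =====
def Claim_equal_subdiv_finder : Prop := ∀ (sequence : String) (subdiv_param : Int), Dom_subdiv_finder sequence subdiv_param → Pre_subdiv_finder sequence subdiv_param → Spec_subdiv_finder sequence subdiv_param (subdiv_finder sequence subdiv_param)
-- ===== LEMMAS AND PROOFS =====

-- proof-side abstractions: the classification step of each port, the two pair-extraction orders
def pvClA (t : Int) (sd : PySem.Dict Int Char) (pr : (Int × Char) × (Int × Char)) : PySem.Dict Int Char :=
  if ¬(pr.2.1 - pr.1.1 > t) then sd else (sd.insert pr.1.1 pr.1.2).insert pr.2.1 pr.2.2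

def pvClB (t : Int) (ov : PySem.Set Int) (pr : (Int × Char) × (Int × Char)) : PySem.Set Int :=
  if pr.2.1 - pr.1.1 > t then PySem.Set.add (PySem.Set.add ov pr.1.1) pr.2.1 else ov

def pvPairsFA : Nat → PySem.Dict Int Char → List ((Int × Char) × (Int × Char))
  | 0, _ => []
  | f+1, dp =>
    match pvScanA dp.items with
    | none => []
    | some (a, b) => (a, b) :: pvPairsFA f ((dp.erase a.1).erase b.1)

def pvPairsStack : List (Int × Char) → List (Int × Char) → List ((Int × Char) × (Int × Char))
  | [], _ => []
  | q :: rest, st =>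
    if pvBracket q.2 then
      match st with
      | t :: st' => if t.2 ≠ q.2 then (t, q) :: pvPairsStack rest st' else pvPairsStack rest (q :: t :: st')
      | [] => pvPairsStack rest [q]
    else pvPairsStack rest st

lemma pvPairsStack_nil (st : List (Int × Char)) : pvPairsStack [] st = [] := rfl

lemma pvPairsStack_cons_nil (q : Int × Char) (rest : List (Int × Char)) :
    pvPairsStack (q :: rest) [] =
      if pvBracket q.2 then pvPairsStack rest [q] else pvPairsStack rest [] := rfl

lemma pvPairsStack_cons_cons (q : Int × Char) (rest : List (Int × Char)) (t : Int × Char)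
    (st' : List (Int × Char)) :
    pvPairsStack (q :: rest) (t :: st') =
      if pvBracket q.2 then
        (if t.2 ≠ q.2 then (t, q) :: pvPairsStack rest st' else pvPairsStack rest (q :: t :: st'))
      else pvPairsStack rest (t :: st') := rfl

def pvBigIdx (t : Int) (P : List ((Int × Char) × (Int × Char))) : List Int :=
  (P.filter (fun pr => decide (pr.2.1 - pr.1.1 > t))).flatMap (fun pr => [pr.1.1, pr.2.1])

def pvMark (c : Char) : Char := if c = '(' then 'O' else if c = ')' then 'C' else c

lemma pvLoopA_snd (n p : Int) : ∀ (fuel : Nat) (dp nd sd : PySem.Dict Int Char),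
    (pvLoopA n p fuel dp nd sd).2 = (pvPairsFA fuel dp).foldl (pvClA (PySem.Int.truncdiv n p)) sd := by
  intro fuel
  induction fuel with
  | zero => intro dp nd sd; simp [pvLoopA, pvPairsFA]
  | succ f ih =>
    intro dp nd sd
    cases h : pvScanA dp.items with
    | none => simp [pvLoopA, pvPairsFA, h]
    | some ab =>
      obtain ⟨a, b⟩ := ab
      simp only [pvLoopA, pvPairsFA, h, List.foldl_cons]
      by_cases hc : b.1 - a.1 > PySem.Int.truncdiv n p
      · simp [hc, pvClA, ih]
      · simp [hc, pvClA, ih]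

lemma pvScanA_none : ∀ (l : List (Int × Char)), pvScanA l = none → ∃ c, ∀ x ∈ l, x.2 = c := by
  intro l
  induction l with
  | nil => intro _; exact ⟨'(', by simp⟩
  | cons a t ih =>
    intro h
    cases t with
    | nil => exact ⟨a.2, by simp⟩
    | cons b r =>
      rw [pvScanA] at h
      by_cases hab : a.2 = b.2
      · rw [if_pos (by simp [hab])] at h
        obtain ⟨c, hc⟩ := ih h
        refine ⟨c, ?_⟩
        intro x hx
        rcases List.mem_cons.mp hx with rfl | hx
        · rw [hab]; exact hc b (by simp)
        · exact hc x hx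
      · rw [if_neg (by simp [hab])] at h
        exact absurd h (by simp)

lemma pvScanA_some : ∀ (l : List (Int × Char)) (a b : Int × Char), pvScanA l = some (a, b) →
    ∃ pre rest, l = pre ++ a :: b :: rest ∧ (∀ x ∈ pre, x.2 = a.2) ∧ ¬ a.2 = b.2 := by
  intro l
  induction l with
  | nil => intro a b h; simp [pvScanA] at h
  | cons x t ih =>
    intro a b h
    cases t with
    | nil => simp [pvScanA] at h
    | cons y r =>
      rw [pvScanA] at h
      by_cases hxy : x.2 = y.2
      · rw [if_pos (by simp [hxy])] at h
        obtain ⟨pre, rest, hl, hpre, hne⟩ := ih a b h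
        refine ⟨x :: pre, rest, by simp [hl], ?_, hne⟩
        intro z hz
        rcases List.mem_cons.mp hz with rfl | hz
        · cases pre with
          | nil => simp only [List.nil_append] at hl; rw [hxy]; rw [List.cons.injEq] at hl; rw [hl.1]
          | cons w pre' =>
            simp only [List.cons_append, List.cons.injEq] at hl
            rw [hxy, hl.1]; exact hpre w (by simp)
        · exact hpre z hz
      · rw [if_neg (by simp [hxy])] at h
        rw [Option.some.injEq, Prod.mk.injEq] at h
        obtain ⟨h1, h2⟩ := h
        exact ⟨[], r, by simp [h1, h2], by simp, by rw [← h1, ← h2]; exact hxy⟩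

lemma pvErase2 (pre rest : List (Int × Char)) (a b : Int × Char)
    (hnd : ((pre ++ a :: b :: rest).map Prod.fst).Nodup) :
    (((PySem.Dict.mk (pre ++ a :: b :: rest)).erase a.1).erase b.1).items = pre ++ rest := by
  rw [List.map_append, List.map_cons, List.map_cons] at hnd
  obtain ⟨hn1, hn2, hdisj⟩ := List.nodup_append.mp hnd
  rw [List.nodup_cons] at hn2
  obtain ⟨hna, hn3⟩ := hn2
  rw [List.nodup_cons] at hn3
  obtain ⟨hnb, hn4⟩ := hn3
  have hab : ¬(a.1 = b.1) := fun he => hna (by rw [he]; simp)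
  have hba : ¬(b.1 = a.1) := fun he => hab he.symm
  have hpa : ∀ x ∈ pre, x.1 ≠ a.1 := by
    intro x hx he
    exact hdisj x.1 (List.mem_map.mpr ⟨x, hx, rfl⟩) a.1 (by simp) he
  have hpb : ∀ x ∈ pre, x.1 ≠ b.1 := by
    intro x hx he
    exact hdisj x.1 (List.mem_map.mpr ⟨x, hx, rfl⟩) b.1 (by simp) he
  have hra : ∀ x ∈ rest, x.1 ≠ a.1 := by
    intro x hx he
    exact hna (by rw [← he]; simp [List.mem_map.mpr ⟨x, hx, rfl⟩])
  have hrb : ∀ x ∈ rest, x.1 ≠ b.1 := by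
    intro x hx he
    exact hnb (by rw [← he]; exact List.mem_map.mpr ⟨x, hx, rfl⟩)
  have e1 : List.filter (fun p => !p.1 == a.1) pre = pre :=
    List.filter_eq_self.mpr (fun x hx => by simp [hpa x hx])
  have e2 : List.filter (fun p => !p.1 == a.1) rest = rest :=
    List.filter_eq_self.mpr (fun x hx => by simp [hra x hx])
  have e4 : (!b.1 == a.1) = true := by simp [hba]
  have e5 : List.filter (fun p => !p.1 == b.1) pre = pre :=
    List.filter_eq_self.mpr (fun x hx => by simp [hpb x hx])
  have e6 : List.filter (fun p => !p.1 == b.1) rest = rest :=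
    List.filter_eq_self.mpr (fun x hx => by simp [hrb x hx])
  have c1 : List.filter (fun p => !p.1 == a.1) (a :: b :: rest) = b :: rest := by
    rw [List.filter_cons, if_neg (by simp), List.filter_cons, if_pos e4, e2]
  have step1 : (PySem.Dict.mk (pre ++ a :: b :: rest)).erase a.1 = PySem.Dict.mk (pre ++ b :: rest) := by
    apply PySem.Dict.ext
    show List.filter (fun p => !p.1 == a.1) (pre ++ a :: b :: rest) = pre ++ b :: rest
    rw [List.filter_append, e1, c1]
  have c2 : List.filter (fun p => !p.1 == b.1) (b :: rest) = rest := by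
    rw [List.filter_cons, if_neg (by simp), e6]
  rw [step1]
  show List.filter (fun p => !p.1 == b.1) (pre ++ b :: rest) = pre ++ rest
  rw [List.filter_append, e5, c2]

lemma pvPairsStack_absorb : ∀ (pre xs st : List (Int × Char)) (c : Char),
    pvBracket c = true → (∀ x ∈ pre, x.2 = c) → (∀ x ∈ st, x.2 = c) →
    pvPairsStack (pre ++ xs) st = pvPairsStack xs (pre.reverse ++ st) := by
  intro pre
  induction pre with
  | nil => intro xs st c _ _ _; simp
  | cons q pre ih =>
    intro xs st c hc hpre hst
    have hq : q.2 = c := hpre q (by simp)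
    cases st with
    | nil =>
      rw [List.cons_append, pvPairsStack_cons_nil, if_pos (by rw [hq]; exact hc)]
      rw [ih xs [q] c hc (fun x hx => hpre x (by simp [hx])) (by simp [hq])]
      simp
    | cons t st' =>
      have ht : t.2 = c := hst t (by simp)
      rw [List.cons_append, pvPairsStack_cons_cons, if_pos (by rw [hq]; exact hc),
        if_neg (by rw [ht, hq]; simp)]
      rw [ih xs (q :: t :: st') c hc (fun x hx => hpre x (by simp [hx])) ?_]
      · simp
      · intro x hx
        rcases List.mem_cons.mp hx with rfl | hx
        · exact hq
        · rcases List.mem_cons.mp hx with rfl | hx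
          · exact ht
          · exact hst x (by simp [hx])

lemma pvPairsStack_allEq : ∀ (l st : List (Int × Char)) (c : Char),
    (∀ x ∈ l, x.2 = c) → (∀ x ∈ st, x.2 = c) → pvPairsStack l st = [] := by
  intro l
  induction l with
  | nil => intro st c _ _; rfl
  | cons q rest ih =>
    intro st c hl hst
    have hq : q.2 = c := hl q (by simp)
    by_cases hb : pvBracket q.2
    · cases st with
      | nil =>
        rw [pvPairsStack_cons_nil, if_pos hb]
        exact ih [q] c (fun x hx => hl x (by simp [hx])) (by simp [hq])
      | cons t st' =>
        have ht : t.2 = c := hst t (by simp)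
        rw [pvPairsStack_cons_cons, if_pos hb, if_neg (by rw [ht, hq]; simp)]
        refine ih (q :: t :: st') c (fun x hx => hl x (by simp [hx])) ?_
        intro x hx
        rcases List.mem_cons.mp hx with rfl | hx
        · exact hq
        · rcases List.mem_cons.mp hx with rfl | hx
          · exact ht
          · exact hst x (by simp [hx])
    · cases st with
      | nil =>
        rw [pvPairsStack_cons_nil, if_neg hb]
        exact ih [] c (fun x hx => hl x (by simp [hx])) (by simp)
      | cons t st' =>
        rw [pvPairsStack_cons_cons, if_neg hb]
        exact ih (t :: st') c (fun x hx => hl x (by simp [hx])) hst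

lemma pvPairsFA_eq_stack : ∀ (fuel : Nat) (l : List (Int × Char)), l.length ≤ fuel →
    (l.map Prod.fst).Nodup → (∀ x ∈ l, pvBracket x.2 = true) →
    pvPairsFA fuel (PySem.Dict.mk l) = pvPairsStack l [] := by
  intro fuel
  induction fuel with
  | zero =>
    intro l hlen _ _
    cases l with
    | nil => rfl
    | cons a t => simp at hlen
  | succ f ih =>
    intro l hlen hnd hbr
    cases h : pvScanA (PySem.Dict.mk l).items with
    | none =>
      obtain ⟨c, hc⟩ := pvScanA_none l h
      simp only [pvPairsFA, h]
      rw [pvPairsStack_allEq l [] c hc (by simp)]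
    | some ab =>
      obtain ⟨a, b⟩ := ab
      obtain ⟨pre, rest, hl, hpre, hne⟩ := pvScanA_some l a b h
      have hmka : a ∈ l := by rw [hl]; simp
      have hmkb : b ∈ l := by rw [hl]; simp
      have hsub : (pre ++ rest).Sublist l := by
        rw [hl]
        exact List.Sublist.append_left
          ((List.sublist_cons_self b rest).trans (List.sublist_cons_self a (b :: rest))) pre
      have hnd' : ((pre ++ rest).map Prod.fst).Nodup := (hsub.map Prod.fst).nodup hnd
      have hbr' : ∀ x ∈ pre ++ rest, pvBracket x.2 = true := fun x hx => hbr x (hsub.mem hx)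
      have hlen' : (pre ++ rest).length ≤ f := by
        have h0 := hlen
        rw [hl] at h0
        simp only [List.length_append, List.length_cons] at h0 ⊢
        omega
      have herase : ((PySem.Dict.mk l).erase a.1).erase b.1 = PySem.Dict.mk (pre ++ rest) := by
        apply PySem.Dict.ext
        rw [hl] at hnd ⊢
        exact pvErase2 pre rest a b hnd
      have hca : pvBracket a.2 = true := hbr a hmka
      have hcb : pvBracket b.2 = true := hbr b hmkb
      have habs1 : pvPairsStack l [] = pvPairsStack (b :: rest) (a :: pre.reverse) := by
        rw [hl, show pre ++ a :: b :: rest = (pre ++ [a]) ++ (b :: rest) by simp]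
        rw [pvPairsStack_absorb (pre ++ [a]) (b :: rest) [] a.2 hca ?_ (by simp)]
        · simp
        · intro x hx
          rcases List.mem_append.mp hx with hx | hx
          · exact hpre x hx
          · simp at hx; rw [hx]
      have habs2 : pvPairsStack (pre ++ rest) [] = pvPairsStack rest pre.reverse := by
        rw [pvPairsStack_absorb pre rest [] a.2 hca hpre (by simp)]
        simp
      have hstep : pvPairsStack (b :: rest) (a :: pre.reverse) =
          (a, b) :: pvPairsStack rest pre.reverse := by
        rw [pvPairsStack_cons_cons, if_pos hcb, if_pos hne]
      simp only [pvPairsFA, h]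
      rw [herase, ih (pre ++ rest) hlen' hnd' hbr', habs2, habs1, hstep]

lemma pvFoldB (n p : Int) : ∀ (l st : List (Int × Char)) (ov : PySem.Set Int),
    (l.foldl (pvStepB n p) (st, ov)).2 = (pvPairsStack l st).foldl (pvClB (PySem.Int.truncdiv n p)) ov := by
  intro l
  induction l with
  | nil => intro st ov; rfl
  | cons q rest ih =>
    intro st ov
    rw [List.foldl_cons]
    by_cases hb : pvBracket q.2
    · have hb' : (q.2 == '(' || q.2 == ')') = true := hb
      cases st with
      | nil =>
        have hs : pvStepB n p ([], ov) q = ([q], ov) := by simp [pvStepB, hb']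
        rw [hs, pvPairsStack_cons_nil, if_pos hb]
        exact ih [q] ov
      | cons t st' =>
        by_cases hne : t.2 = q.2
        · have hs : pvStepB n p (t :: st', ov) q = (q :: t :: st', ov) := by
            simp [pvStepB, hb', hne]
          rw [hs, pvPairsStack_cons_cons, if_pos hb, if_neg (by simp [hne])]
          exact ih (q :: t :: st') ov
        · have hs : pvStepB n p (t :: st', ov) q =
              (st', if q.1 - t.1 > PySem.Int.truncdiv n p then
                PySem.Set.add (PySem.Set.add ov t.1) q.1 else ov) := by
            simp [pvStepB, hb', bne_iff_ne, hne]
          rw [hs, pvPairsStack_cons_cons, if_pos hb, if_pos hne, List.foldl_cons]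
          exact ih st' _
    · have hb' : (q.2 == '(' || q.2 == ')') = false := by simpa [pvBracket] using hb
      have hs : pvStepB n p (st, ov) q = (st, ov) := by simp [pvStepB, hb']
      cases st with
      | nil => rw [hs, pvPairsStack_cons_nil, if_neg hb]; exact ih [] ov
      | cons t st' => rw [hs, pvPairsStack_cons_cons, if_neg hb]; exact ih (t :: st') ov

lemma pvPairsStack_filter : ∀ (l st : List (Int × Char)),
    pvPairsStack (l.filter (fun q => pvBracket q.2)) st = pvPairsStack l st := by
  intro l
  induction l with
  | nil => intro st; rfl
  | cons q rest ih =>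
    intro st
    by_cases hb : pvBracket q.2
    · rw [show List.filter (fun q => pvBracket q.2) (q :: rest) =
          q :: List.filter (fun q => pvBracket q.2) rest by simp [hb]]
      cases st with
      | nil =>
        rw [pvPairsStack_cons_nil, pvPairsStack_cons_nil, if_pos hb, if_pos hb]
        exact ih [q]
      | cons t st' =>
        rw [pvPairsStack_cons_cons, pvPairsStack_cons_cons, if_pos hb, if_pos hb]
        by_cases hne : t.2 ≠ q.2
        · rw [if_pos hne, if_pos hne, ih st']
        · rw [if_neg hne, if_neg hne]
          exact ih (q :: t :: st')
    · rw [show List.filter (fun q => pvBracket q.2) (q :: rest) =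
          List.filter (fun q => pvBracket q.2) rest by simp [hb]]
      cases st with
      | nil => rw [pvPairsStack_cons_nil, if_neg hb]; exact ih []
      | cons t st' => rw [pvPairsStack_cons_cons, if_neg hb]; exact ih (t :: st')

lemma pvPairsStack_mem : ∀ (l st : List (Int × Char)) (pr : (Int × Char) × (Int × Char)),
    pr ∈ pvPairsStack l st → (pr.1 ∈ l ∨ pr.1 ∈ st) ∧ pr.2 ∈ l := by
  intro l
  induction l with
  | nil => intro st pr h; simp [pvPairsStack_nil] at h
  | cons q rest ih =>
    intro st pr h
    by_cases hb : pvBracket q.2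
    · cases st with
      | nil =>
        rw [pvPairsStack_cons_nil, if_pos hb] at h
        obtain ⟨h1, h2⟩ := ih [q] pr h
        refine ⟨?_, by simp [h2]⟩
        rcases h1 with h1 | h1
        · exact Or.inl (by simp [h1])
        · simp at h1; exact Or.inl (by simp [h1])
      | cons t st' =>
        rw [pvPairsStack_cons_cons, if_pos hb] at h
        by_cases hne : t.2 ≠ q.2
        · rw [if_pos hne] at h
          rcases List.mem_cons.mp h with rfl | h
          · exact ⟨Or.inr (by simp), by simp⟩
          · obtain ⟨h1, h2⟩ := ih st' pr h
            refine ⟨?_, by simp [h2]⟩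
            rcases h1 with h1 | h1
            · exact Or.inl (by simp [h1])
            · exact Or.inr (by simp [h1])
        · rw [if_neg hne] at h
          obtain ⟨h1, h2⟩ := ih (q :: t :: st') pr h
          refine ⟨?_, by simp [h2]⟩
          rcases h1 with h1 | h1
          · exact Or.inl (by simp [h1])
          · rcases List.mem_cons.mp h1 with h1 | h1
            · exact Or.inl (by simp [h1])
            · exact Or.inr h1
    · cases st with
      | nil =>
        rw [pvPairsStack_cons_nil, if_neg hb] at h
        obtain ⟨h1, h2⟩ := ih [] pr h
        refine ⟨?_, by simp [h2]⟩
        rcases h1 with h1 | h1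
        · exact Or.inl (by simp [h1])
        · simp at h1
      | cons t st' =>
        rw [pvPairsStack_cons_cons, if_neg hb] at h
        obtain ⟨h1, h2⟩ := ih (t :: st') pr h
        refine ⟨?_, by simp [h2]⟩
        rcases h1 with h1 | h1
        · exact Or.inl (by simp [h1])
        · exact Or.inr h1

lemma pvFoldPair : ∀ (l : List (Int × Char)) (d1 d2 : PySem.Dict Int Char),
    l.foldl pvDictsStep (d1, d2) =
      (l.foldl (fun d q => if pvBracket q.2 then d.insert q.1 q.2 else d) d1,
       l.foldl (fun d q => d.insert q.1 q.2) d2) := by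
  intro l
  induction l with
  | nil => intro d1 d2; rfl
  | cons q rest ih => intro d1 d2; rw [List.foldl_cons]; exact ih _ _

lemma pvFoldFilter : ∀ (l : List (Int × Char)) (d : PySem.Dict Int Char),
    l.foldl (fun d q => if pvBracket q.2 then d.insert q.1 q.2 else d) d =
      (l.filter (fun q => pvBracket q.2)).foldl (fun d q => d.insert q.1 q.2) d := by
  intro l
  induction l with
  | nil => intro d; rfl
  | cons q rest ih =>
    intro d
    by_cases hb : pvBracket q.2
    · rw [show List.filter (fun q => pvBracket q.2) (q :: rest) =
          q :: List.filter (fun q => pvBracket q.2) rest by simp [hb]]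
      rw [List.foldl_cons, List.foldl_cons, if_pos hb]
      exact ih _
    · rw [show List.filter (fun q => pvBracket q.2) (q :: rest) =
          List.filter (fun q => pvBracket q.2) rest by simp [hb]]
      rw [List.foldl_cons, if_neg hb]
      exact ih _

lemma pvItemsInsertFold (l : List (Int × Char)) (h : (l.map Prod.fst).Nodup) :
    (l.foldl (fun d q => d.insert q.1 q.2) PySem.Dict.empty).items = l := by
  have h2 := PySem.Dict.items_foldl_insert_fresh l Prod.fst Prod.snd PySem.Dict.empty
    (fun a _ => PySem.Dict.contains_empty _) h
  simpa using h2

lemma pvMemKeysFold (t : Int) : ∀ (P : List ((Int × Char) × (Int × Char))) (sd : PySem.Dict Int Char) (k : Int),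
    k ∈ (P.foldl (pvClA t) sd).keys ↔ k ∈ sd.keys ∨ k ∈ pvBigIdx t P := by
  intro P
  induction P with
  | nil => intro sd k; simp [pvBigIdx]
  | cons pr P ih =>
    intro sd k
    rw [List.foldl_cons, ih]
    by_cases hbig : pr.2.1 - pr.1.1 > t
    · have h1 : pvClA t sd pr = (sd.insert pr.1.1 pr.1.2).insert pr.2.1 pr.2.2 := by
        simp only [pvClA]; rw [if_neg (not_not_intro hbig)]
      have h2 : pvBigIdx t (pr :: P) = pr.1.1 :: pr.2.1 :: pvBigIdx t P := by
        simp [pvBigIdx, hbig]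
      rw [h1, h2]
      simp only [PySem.Dict.mem_keys_insert, List.mem_cons]
      tauto
    · have h1 : pvClA t sd pr = sd := by
        simp only [pvClA]; rw [if_pos hbig]
      have h2 : pvBigIdx t (pr :: P) = pvBigIdx t P := by
        simp [pvBigIdx, hbig]
      rw [h1, h2]

lemma pvMemSetFold (t : Int) : ∀ (P : List ((Int × Char) × (Int × Char))) (ov : PySem.Set Int) (k : Int),
    k ∈ P.foldl (pvClB t) ov ↔ k ∈ ov ∨ k ∈ pvBigIdx t P := by
  intro P
  induction P with
  | nil => intro ov k; simp [pvBigIdx]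
  | cons pr P ih =>
    intro ov k
    rw [List.foldl_cons, ih]
    by_cases hbig : pr.2.1 - pr.1.1 > t
    · have h1 : pvClB t ov pr = PySem.Set.add (PySem.Set.add ov pr.1.1) pr.2.1 := by
        simp only [pvClB]; rw [if_pos hbig]
      have h2 : pvBigIdx t (pr :: P) = pr.1.1 :: pr.2.1 :: pvBigIdx t P := by
        simp [pvBigIdx, hbig]
      rw [h1, h2]
      simp only [PySem.Set.mem_add, List.mem_cons]
      tauto
    · have h1 : pvClB t ov pr = ov := by
        simp only [pvClB]; rw [if_neg hbig]
      have h2 : pvBigIdx t (pr :: P) = pvBigIdx t P := by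
        simp [pvBigIdx, hbig]
      rw [h1, h2]

lemma pvMark_idem (c : Char) : pvMark (pvMark c) = pvMark c := by
  by_cases h1 : c = '('
  · simp [pvMark, h1]
  · by_cases h2 : c = ')'
    · simp [pvMark, h2]
    · simp [pvMark, h1, h2]

lemma pvRewriteStep_items (ds : PySem.Dict Int Char) (k : Int) (hnd : ds.keys.Nodup) :
    (pvRewriteStep ds k).items = ds.items.map (fun q => if q.1 = k then (q.1, pvMark q.2) else q) := by
  cases h : PySem.Dict.get? ds k with
  | none =>
    have hk : k ∉ ds.keys := (PySem.Dict.get?_eq_none_iff_not_mem_keys ds k).mp h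
    have hstep : pvRewriteStep ds k = ds := by simp [pvRewriteStep, h]
    rw [hstep]
    symm
    have hcong : ∀ q ∈ ds.items, (if q.1 = k then (q.1, pvMark q.2) else q) = q := by
      intro q hq
      have hq1 : q.1 ∈ ds.keys := by
        show q.1 ∈ ds.items.map (fun x => x.1)
        exact List.mem_map.mpr ⟨q, hq, rfl⟩
      rw [if_neg (fun he => hk (by rw [← he]; exact hq1))]
    rw [List.map_congr_left hcong]
    simp
  | some c =>
    have hcont : ds.contains k = true := by
      rw [PySem.Dict.contains_eq_isSome_get?, h]; rfl
    have hval : ∀ q ∈ ds.items, q.1 = k → q.2 = c := by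
      intro q hq he
      have hq' : (k, q.2) ∈ ds.items := by rw [← he]; exact hq
      have hg : ds.get? k = some q.2 := PySem.Dict.get?_of_mem_items ds hq' hnd
      rw [h] at hg
      exact (Option.some.inj hg).symm
    by_cases h1 : c = '('
    · have hstep : pvRewriteStep ds k = ds.insert k 'O' := by simp [pvRewriteStep, h, h1]
      rw [hstep, PySem.Dict.items_insert_of_contains ds 'O' hcont]
      apply List.map_congr_left
      intro q hq
      by_cases he : q.1 = k
      · rw [if_pos (by simp [he]), if_pos he, hval q hq he, h1]
        simp [pvMark, he]
      · rw [if_neg (by simp [he]), if_neg he]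
    · by_cases h2 : c = ')'
      · have hstep : pvRewriteStep ds k = ds.insert k 'C' := by simp [pvRewriteStep, h, h2]
        rw [hstep, PySem.Dict.items_insert_of_contains ds 'C' hcont]
        apply List.map_congr_left
        intro q hq
        by_cases he : q.1 = k
        · rw [if_pos (by simp [he]), if_pos he, hval q hq he, h2]
          simp [pvMark, he]
        · rw [if_neg (by simp [he]), if_neg he]
      · have hstep : pvRewriteStep ds k = ds := by simp [pvRewriteStep, h, h1, h2]
        rw [hstep]
        symm
        have hcong : ∀ q ∈ ds.items, (if q.1 = k then (q.1, pvMark q.2) else q) = q := by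
          intro q hq
          by_cases he : q.1 = k
          · rw [if_pos he, show pvMark q.2 = q.2 by rw [hval q hq he]; simp [pvMark, h1, h2]]
          · rw [if_neg he]
        rw [List.map_congr_left hcong]
        simp
  
lemma pvRewriteStep_keys (ds : PySem.Dict Int Char) (k : Int) (hnd : ds.keys.Nodup) :
    (pvRewriteStep ds k).keys = ds.keys := by
  show (pvRewriteStep ds k).items.map (fun x => x.1) = ds.items.map (fun x => x.1)
  rw [pvRewriteStep_items ds k hnd, List.map_map]
  apply List.map_congr_left
  intro q _
  by_cases he : q.1 = k <;> simp [he]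

lemma pvRewriteFold_items : ∀ (K : List Int) (ds : PySem.Dict Int Char), ds.keys.Nodup →
    (K.foldl pvRewriteStep ds).items = ds.items.map (fun q => if q.1 ∈ K then (q.1, pvMark q.2) else q) := by
  intro K
  induction K with
  | nil =>
    intro ds _
    simp
  | cons k K ih =>
    intro ds hnd
    rw [List.foldl_cons, ih _ (by rw [pvRewriteStep_keys ds k hnd]; exact hnd),
      pvRewriteStep_items ds k hnd, List.map_map]
    apply List.map_congr_left
    intro q _
    by_cases he : q.1 = k
    · by_cases hK : k ∈ K
      · simp [he, hK, pvMark_idem]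
      · simp [he, hK]
    · simp [he]

lemma pvKeyFun : ∀ (l : List (Int × Char)) (i : Int) (c c' : Char),
    (l.map Prod.fst).Nodup → (i, c) ∈ l → (i, c') ∈ l → c = c' := by
  intro l
  induction l with
  | nil => intro i c c' _ h; simp at h
  | cons x t ih =>
    intro i c c' hnd h1 h2
    rw [List.map_cons, List.nodup_cons] at hnd
    rcases List.mem_cons.mp h1 with rfl | h1 <;> rcases List.mem_cons.mp h2 with h2 | h2
    · exact congrArg Prod.snd h2.symm
    · exact absurd (List.mem_map.mpr ⟨(i, c'), h2, rfl⟩) hnd.1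
    · rw [← h2] at hnd
      exact absurd (List.mem_map.mpr ⟨(i, c), h1, rfl⟩) hnd.1
    · exact ih i c c' hnd.2 h1 h2

lemma pvGroupEq : ∀ (l : List (Int × Char)) (gl : List (PySem.Dict Int String))
    (cur : PySem.Dict Int String) (bflag : Bool),
    (l.foldl pvGroupStepA (gl, cur, bflag)).1 = (l.foldl pvGroupStepB (gl, cur)).1 ∧
    (l.foldl pvGroupStepA (gl, cur, bflag)).2.1 = (l.foldl pvGroupStepB (gl, cur)).2 := by
  intro l
  induction l with
  | nil => intro gl cur bflag; exact ⟨rfl, rfl⟩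
  | cons q rest ih =>
    intro gl cur bflag
    rw [List.foldl_cons, List.foldl_cons]
    by_cases h1 : q.2 = 'O'
    · rw [show pvGroupStepA (gl, cur, bflag) q = (gl, cur.insert q.1 "(", if bflag then false else bflag) by
        simp [pvGroupStepA, h1]]
      rw [show pvGroupStepB (gl, cur) q = (gl, cur.insert q.1 "(") by simp [pvGroupStepB, h1]]
      exact ih gl (cur.insert q.1 "(") _
    · by_cases h2 : q.2 = 'C'
      · rw [show pvGroupStepA (gl, cur, bflag) q = (gl, cur.insert q.1 ")", if bflag then false else bflag) by
          simp [pvGroupStepA, h2]]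
        rw [show pvGroupStepB (gl, cur) q = (gl, cur.insert q.1 ")") by simp [pvGroupStepB, h2]]
        exact ih gl (cur.insert q.1 ")") _
      · rw [show pvGroupStepA (gl, cur, bflag) q =
            (if cur.items ≠ [] then gl ++ [cur] else gl, PySem.Dict.empty, true) by
          simp [pvGroupStepA, h1, h2]]
        rw [show pvGroupStepB (gl, cur) q =
            (if cur.items ≠ [] then gl ++ [cur] else gl, PySem.Dict.empty) by
          simp [pvGroupStepB, h1, h2]]
        exact ih _ PySem.Dict.empty _

lemma pvEnumNodup (cs : List Char) : ((PySem.List.enumerate cs).map Prod.fst).Nodup := by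
  have h := PySem.List.map_fst_enumerate cs 0
  rw [show (Prod.fst : Int × Char → Int) = (fun x => x.1) from rfl, h]
  exact PySem.List.nodup_pyRange_one _ _

-- ===== VERDICT (by name: the statement is the Claim_ definition above) =====
theorem subdiv_finder_spec : Claim_equal_subdiv_finder := by
  intro s p hdom hpre
  unfold Spec_subdiv_finder
  simp only [subdiv_finder, subdiv_finder_alt]
  generalize s.toList = cs
  generalize hE : PySem.List.enumerate cs = E
  generalize hnp : PySem.Str.len s = n
  -- nodup facts
  have hEnd : (E.map Prod.fst).Nodup := by rw [← hE]; exact pvEnumNodup cs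
  have hFsub : (E.filter (fun q => pvBracket q.2)).Sublist E := List.filter_sublist
  have hFnd : ((E.filter (fun q => pvBracket q.2)).map Prod.fst).Nodup :=
    ((hFsub.map Prod.fst).nodup hEnd)
  have hFbr : ∀ x ∈ E.filter (fun q => pvBracket q.2), pvBracket x.2 = true :=
    fun x hx => (List.mem_filter.mp hx).2
  -- A: the dict-building fold
  rw [pvFoldPair, pvFoldFilter]
  dsimp only
  rw [show (E.filter (fun q => pvBracket q.2)).foldl (fun d q => d.insert q.1 q.2) PySem.Dict.empty
      = PySem.Dict.mk (E.filter (fun q => pvBracket q.2)) from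
    PySem.Dict.ext (pvItemsInsertFold _ hFnd)]
  rw [show E.foldl (fun d q => d.insert q.1 q.2) PySem.Dict.empty = PySem.Dict.mk E from
    PySem.Dict.ext (pvItemsInsertFold _ hEnd)]
  -- A: the while loop produces the classification fold over the pairs
  rw [pvLoopA_snd, show (PySem.Dict.mk (E.filter (fun q => pvBracket q.2))).items
      = E.filter (fun q => pvBracket q.2) from rfl]
  rw [pvPairsFA_eq_stack _ _ le_rfl hFnd hFbr]
  -- B: the stack fold produces the same classification fold
  rw [pvFoldB, ← pvPairsStack_filter E []]
  -- names for the shared data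
  generalize hP : pvPairsStack (E.filter (fun q => pvBracket q.2)) [] = P
  generalize hSD : P.foldl (pvClA (PySem.Int.truncdiv n p)) PySem.Dict.empty = SD
  -- A: the rewrite loop over subdiv.keys, as a pointwise map
  have hmkEnd : (PySem.Dict.mk E).keys.Nodup := by
    show (E.map (fun x => x.1)).Nodup
    exact hEnd
  have hvals : PySem.Dict.values (SD.keys.foldl pvRewriteStep (PySem.Dict.mk E)) =
      E.map (fun q => if q.1 ∈ SD.keys then pvMark q.2 else q.2) := by
    show (SD.keys.foldl pvRewriteStep (PySem.Dict.mk E)).items.map (fun x => x.2) = _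
    rw [pvRewriteFold_items SD.keys (PySem.Dict.mk E) hmkEnd,
      show (PySem.Dict.mk E).items = E from rfl, List.map_map]
    apply List.map_congr_left
    intro q _
    by_cases hk : q.1 ∈ SD.keys <;> simp [hk]
  rw [hvals]
  -- the two character maps agree pointwise
  have hchars : E.map (fun q => if q.1 ∈ SD.keys then pvMark q.2 else q.2) =
      E.map (fun q => if PySem.Set.contains (P.foldl (pvClB (PySem.Int.truncdiv n p)) PySem.Set.empty) q.1
        then (if q.2 == '(' then 'O' else 'C') else q.2) := by
    apply List.map_congr_left
    intro q hq
    have hiff1 : q.1 ∈ SD.keys ↔ q.1 ∈ pvBigIdx (PySem.Int.truncdiv n p) P := by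
      rw [← hSD, pvMemKeysFold]
      simp [PySem.Dict.empty, PySem.Dict.keys]
    have hiff2 : PySem.Set.contains (P.foldl (pvClB (PySem.Int.truncdiv n p)) PySem.Set.empty) q.1 = true ↔
        q.1 ∈ pvBigIdx (PySem.Int.truncdiv n p) P := by
      rw [show PySem.Set.contains (P.foldl (pvClB (PySem.Int.truncdiv n p)) PySem.Set.empty) q.1
          = List.contains (P.foldl (pvClB (PySem.Int.truncdiv n p)) PySem.Set.empty) q.1 from rfl]
      rw [List.contains_iff_mem, pvMemSetFold]
      simp [PySem.Set.empty]
    by_cases hin : q.1 ∈ pvBigIdx (PySem.Int.truncdiv n p) P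
    · rw [if_pos (hiff1.mpr hin), if_pos (hiff2.mpr hin)]
      -- q.2 is a bracket character
      obtain ⟨pr, hprf, hqm⟩ := List.mem_flatMap.mp hin
      have hprP : pr ∈ P := List.mem_of_mem_filter hprf
      have hmem := pvPairsStack_mem (E.filter (fun q => pvBracket q.2)) [] pr (hP ▸ hprP)
      have hbr : pvBracket q.2 = true := by
        rcases List.mem_cons.mp hqm with h1 | h1
        · -- q.1 = pr.1.1
          have hel : pr.1 ∈ E.filter (fun q => pvBracket q.2) := by
            rcases hmem.1 with hm | hm
            · exact hm
            · simp at hm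
          have helE : pr.1 ∈ E := hFsub.mem hel
          have heq : q.2 = pr.1.2 := by
            apply pvKeyFun E q.1 q.2 pr.1.2 hEnd hq
            rw [h1]
            exact helE
          rw [heq]
          exact hFbr pr.1 hel
        · simp only [List.mem_singleton] at h1
          have hel : pr.2 ∈ E.filter (fun q => pvBracket q.2) := hmem.2
          have helE : pr.2 ∈ E := hFsub.mem hel
          have heq : q.2 = pr.2.2 := by
            apply pvKeyFun E q.1 q.2 pr.2.2 hEnd hq
            rw [h1]
            exact helE
          rw [heq]
          exact hFbr pr.2 hel
      by_cases hop : q.2 = '('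
      · simp [pvMark, hop]
      · have hcl : q.2 = ')' := by
          have := hbr
          simp only [pvBracket, Bool.or_eq_true, beq_iff_eq] at this
          tauto
        simp [pvMark, hcl]
    · rw [if_neg (fun hmm => hin (hiff1.mp hmm)), if_neg (by
        intro hmm
        exact hin (hiff2.mp (by simpa using hmm)))]
  rw [hchars]
  -- the grouping folds agree
  obtain ⟨hg1, hg2⟩ := pvGroupEq (PySem.List.enumerate
    (E.map (fun q => if PySem.Set.contains (P.foldl (pvClB (PySem.Int.truncdiv n p)) PySem.Set.empty) q.1
      then (if q.2 == '(' then 'O' else 'C') else q.2))) [] PySem.Dict.empty true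
  rw [hg1, hg2]
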